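-- pv_equiv track=rewrite | github.com/VARUNGSV/Metro_project | route_finder_fixed.py | _build_line_segments
-- ===== SOURCE A (Python) =====
-- def _build_line_segments(graph, path):
--     lines_used = []
--     current_line = None
--     line_start = None
--
--     for idx in range(len(path) - 1):
--         edge_line = graph[path[idx]][path[idx + 1]].get("line")
--
--         if edge_line == "Interchange":
--             if current_line is not None:
--                 lines_used.append((current_line, line_start, path[idx]))
--                 current_line = None
--                 line_start = None
--             continue
--
--         if current_line is None:
--             current_line = edge_line
--             line_start = path[idx]
--         elif edge_line != current_line:
--             lines_used.append((current_line, line_start, path[idx]))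
--             current_line = edge_line
--             line_start = path[idx]
--
--     if current_line is not None:
--         lines_used.append((current_line, line_start, path[-1]))
--
--     return lines_used
-- ===== SOURCE B (Python) =====
-- from itertools import groupby
--
--
-- def _build_line_segments(graph, path):
--     edges = [(graph[path[i]][path[i + 1]].get("line"), path[i], path[i + 1])
--              for i in range(len(path) - 1)]
--     segments = []
--     for line, grp in groupby(edges, key=lambda e: e[0]):
--         run = list(grp)
--         if line is None or line == "Interchange":
--             continue
--         segments.append((line, run[0][1], run[-1][2]))
--     return segments
-- ===== Notes on version B (the rewrite author's own statement) =====
-- stated objective: idiomatic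
-- what changed: Replaces A's running current_line/line_start state machine with a build-then-group decomposition: materialize the list of (line,u,v) edges, group consecutive edges by line with itertools.groupby, skip None/Interchange groups, and emit (line, first_from, last_to) per group.
import Mathlib
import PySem

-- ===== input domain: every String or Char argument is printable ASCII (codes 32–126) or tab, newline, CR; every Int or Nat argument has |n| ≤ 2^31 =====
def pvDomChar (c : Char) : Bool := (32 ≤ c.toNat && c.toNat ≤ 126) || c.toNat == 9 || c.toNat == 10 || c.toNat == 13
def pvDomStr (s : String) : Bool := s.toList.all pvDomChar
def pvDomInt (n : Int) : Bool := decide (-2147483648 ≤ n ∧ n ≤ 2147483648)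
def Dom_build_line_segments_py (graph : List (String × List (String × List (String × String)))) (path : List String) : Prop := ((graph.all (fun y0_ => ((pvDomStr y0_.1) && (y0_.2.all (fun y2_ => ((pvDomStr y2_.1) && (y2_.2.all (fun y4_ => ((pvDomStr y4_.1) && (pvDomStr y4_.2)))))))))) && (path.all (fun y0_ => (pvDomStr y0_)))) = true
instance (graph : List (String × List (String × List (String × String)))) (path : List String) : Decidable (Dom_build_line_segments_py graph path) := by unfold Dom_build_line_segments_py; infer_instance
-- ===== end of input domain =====

-- B replaces A's running current_line/line_start state machine by a build-then-group
-- decomposition (materialize the edge list, group consecutive equal-line edges, emit one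
-- segment per non-None non-Interchange group); objective: idiomatic, same cost.

-- ===== PORT A =====
-- graph[path[idx]][path[idx+1]].get("line"); the two outer subscripts raise KeyError on a
-- missing key — excluded by Pre_ below; the port totalizes them with .getD [].
def build_line_segments_py (graph : List (String × List (String × List (String × String)))) (path : List String) : List (String × String × String) :=
  let st :=
    (PySem.List.pyRange 0 ((path.length : Int) - 1) 1).foldl
      (fun (st : List (String × String × String) × Option String × Option String) idx =>
        let u := PySem.List.pyGetD path idx ""
        let v := PySem.List.pyGetD path (idx + 1) ""
        let edge_line : Option String :=
          (PySem.Dict.mk (((PySem.Dict.mk graph).get? u).getD [])).get? v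
            |>.getD [] |> PySem.Dict.mk |>.get? "line"
        if edge_line == some "Interchange" then
          match st.2.1 with
          | some cl => (st.1 ++ [(cl, st.2.2.getD "", u)], none, none)
          | none => st
        else
          match st.2.1 with
          | none => (st.1, edge_line, some u)
          | some cl =>
            if edge_line != some cl then (st.1 ++ [(cl, st.2.2.getD "", u)], edge_line, some u)
            else st)
      ([], none, none)
  match st.2.1 with
  | some cl => st.1 ++ [(cl, st.2.2.getD "", PySem.List.pyGetD path (-1) "")]
  | none => st.1

-- ===== PORT B =====
-- graph[path[i]][path[i+1]].get("line"), totalized like A's port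
def pvLineGet (graph : List (String × List (String × List (String × String)))) (u v : String) : Option String :=
  (PySem.Dict.mk (((PySem.Dict.mk graph).get? u).getD [])).get? v |>.getD [] |> PySem.Dict.mk |>.get? "line"

def pvDefE : Option String × String × String := (none, "", "")

-- transliteration of itertools.groupby (keys with their consecutive runs)
def pvGroupRuns : List (Option String × String × String) → List (Option String × List (Option String × String × String))
  | [] => []
  | e :: es =>
    (e.1, e :: es.takeWhile (fun x => x.1 == e.1)) :: pvGroupRuns (es.dropWhile (fun x => x.1 == e.1))
termination_by l => l.length
decreasing_by simp; have := List.length_dropWhile_le (fun x => x.1 == e.1) es; omega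

def build_line_segments_py_alt (graph : List (String × List (String × List (String × String)))) (path : List String) : List (String × String × String) :=
  let edges :=
    (PySem.List.pyRange 0 ((path.length : Int) - 1) 1).map
      (fun i =>
        (pvLineGet graph (PySem.List.pyGetD path i "") (PySem.List.pyGetD path (i + 1) ""),
         PySem.List.pyGetD path i "", PySem.List.pyGetD path (i + 1) ""))
  (pvGroupRuns edges).foldl
    (fun segments g =>
      match g.1 with
      | none => segments
      | some line =>
        if line == "Interchange" then segments
        else
          segments ++
            [(line, (PySem.List.pyGetD g.2 0 pvDefE).2.1, (PySem.List.pyGetD g.2 (-1) pvDefE).2.2)])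
    []

-- ===== PRECONDITION & SPEC =====
-- exactly the inputs on which Python A returns: every consecutive path pair must be a key chain
-- in graph (otherwise graph[path[idx]] or its [path[idx+1]] raises KeyError)
def Pre_build_line_segments_py (graph : List (String × List (String × List (String × String)))) (path : List String) : Prop :=
  ((path.zip path.tail).all
    (fun p =>
      match (PySem.Dict.mk graph).get? p.1 with
      | none => false
      | some d => ((PySem.Dict.mk d).get? p.2).isSome)) = true
instance (graph : List (String × List (String × List (String × String)))) (path : List String) : Decidable (Pre_build_line_segments_py graph path) := by unfold Pre_build_line_segments_py; infer_instance

def pvWitness_build_line_segments_py : (List (String × List (String × List (String × String)))) × List String :=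
  ([("a", [("b", [("line", "Red")])]), ("b", [("c", [("line", "Interchange")])])], ["a", "b", "c"])

def Spec_build_line_segments_py (graph : List (String × List (String × List (String × String)))) (path : List String) (out : List (String × String × String)) : Prop := out = build_line_segments_py_alt graph path
instance (graph : List (String × List (String × List (String × String)))) (path : List String) (out : List (String × String × String)) : Decidable (Spec_build_line_segments_py graph path out) := by unfold Spec_build_line_segments_py; infer_instance

-- ===== CLAIM (what is proved, stated in full; the proofs are below) =====
def Claim_equal_build_line_segments_py : Prop := ∀ (graph : List (String × List (String × List (String × String)))) (path : List String), Dom_build_line_segments_py graph path → Pre_build_line_segments_py graph path → Spec_build_line_segments_py graph path (build_line_segments_py graph path)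

-- ===== LEMMAS AND PROOFS =====

-- A's loop body as a function of the edge triple (line, from-node, to-node)
def pvStepA (st : List (String × String × String) × Option String × Option String)
    (e : Option String × String × String) :
    List (String × String × String) × Option String × Option String :=
  if e.1 == some "Interchange" then
    match st.2.1 with
    | some cl => (st.1 ++ [(cl, st.2.2.getD "", e.2.1)], none, none)
    | none => st
  else
    match st.2.1 with
    | none => (st.1, e.1, some e.2.1)
    | some cl =>
      if e.1 != some cl then (st.1 ++ [(cl, st.2.2.getD "", e.2.1)], e.1, some e.2.1)
      else st

def pvFinalA (st : List (String × String × String) × Option String × Option String)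
    (last : String) : List (String × String × String) :=
  match st.2.1 with
  | some cl => st.1 ++ [(cl, st.2.2.getD "", last)]
  | none => st.1

def pvSegOf (g : Option String × List (Option String × String × String)) :
    List (String × String × String) :=
  match g.1 with
  | none => []
  | some line =>
    if line == "Interchange" then []
    else [(line, (PySem.List.pyGetD g.2 0 pvDefE).2.1, (PySem.List.pyGetD g.2 (-1) pvDefE).2.2)]

def pvBSegs (es : List (Option String × String × String)) : List (String × String × String) :=
  (pvGroupRuns es).flatMap pvSegOf

def pvEdges (graph : List (String × List (String × List (String × String)))) (path : List String) :
    List (Option String × String × String) :=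
  (path.zip path.tail).map (fun p => (pvLineGet graph p.1 p.2, p.1, p.2))

-- index-pair loop over range(len(l)-1) = loop over consecutive pairs (Nat range form)
theorem pvFoldPairsNat {sigma : Type} (f : sigma → String → String → sigma) :
    ∀ (l : List String) (init : sigma),
      (List.range (l.length - 1)).foldl (fun s k => f s (l.getD k "") (l.getD (k + 1) "")) init
        = (l.zip l.tail).foldl (fun s p => f s p.1 p.2) init := by
  intro l
  induction l with
  | nil => intro init; simp
  | cons x l2 ih =>
    intro init
    cases l2 with
    | nil => simp
    | cons y t =>
      have hlen : (x :: y :: t).length - 1 = (y :: t).length - 1 + 1 := by simp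
      rw [hlen, List.range_succ_eq_map, List.foldl_cons, List.foldl_map]
      have h2 := ih (f init x y)
      simp only [List.getD_cons_zero, List.getD_cons_succ] at h2 ⊢
      rw [h2]
      simp

-- the same, for Python's range over Int indices
theorem pvFoldPairs {sigma : Type} (f : sigma → String → String → sigma) (l : List String)
    (init : sigma) :
    (PySem.List.pyRange 0 ((l.length : Int) - 1) 1).foldl
        (fun s i => f s (PySem.List.pyGetD l i "") (PySem.List.pyGetD l (i + 1) "")) init
      = (l.zip l.tail).foldl (fun s p => f s p.1 p.2) init := by
  rw [PySem.List.pyRange_one, List.foldl_map]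
  have htn : ((l.length : Int) - 1 - 0).toNat = l.length - 1 := by omega
  rw [htn]
  have hbody : (fun (s : sigma) (k : Nat) =>
      f s (PySem.List.pyGetD l ((0 : Int) + k) "") (PySem.List.pyGetD l ((0 : Int) + k + 1) ""))
      = fun s k => f s (l.getD k "") (l.getD (k + 1) "") := by
    funext s k
    have h1 : ((0 : Int) + k) = ((k : Nat) : Int) := by omega
    have h2 : ((0 : Int) + k + 1) = (((k + 1 : Nat)) : Int) := by push_cast; omega
    rw [h2, h1, PySem.List.pyGetD_natCast, PySem.List.pyGetD_natCast]
  rw [hbody, pvFoldPairsNat]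

theorem pvMapPairs {alpha : Type} (g : String → String → alpha) (l : List String) :
    (PySem.List.pyRange 0 ((l.length : Int) - 1) 1).map
        (fun i => g (PySem.List.pyGetD l i "") (PySem.List.pyGetD l (i + 1) ""))
      = (l.zip l.tail).map (fun p => g p.1 p.2) := by
  have h1 := pvFoldPairs (fun (s : List alpha) u v => s ++ [g u v]) l []
  rw [PySem.List.foldl_append_singleton_eq_map, PySem.List.foldl_append_singleton_eq_map] at h1
  simpa using h1

-- B's port computes pvBSegs of the edge list
theorem pvAlt_eq (graph : List (String × List (String × List (String × String))))
    (path : List String) :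
    build_line_segments_py_alt graph path = pvBSegs (pvEdges graph path) := by
  unfold build_line_segments_py_alt
  rw [pvMapPairs (fun u v => (pvLineGet graph u v, u, v)) path]
  have hbody : (fun (segments : List (String × String × String))
      (g : Option String × List (Option String × String × String)) =>
      match g.1 with
      | none => segments
      | some line =>
        if line == "Interchange" then segments
        else
          segments ++
            [(line, (PySem.List.pyGetD g.2 0 pvDefE).2.1,
              (PySem.List.pyGetD g.2 (-1) pvDefE).2.2)])
      = fun segments g => segments ++ pvSegOf g := by
    funext segments g
    cases hg : g.1 with
    | none => simp [pvSegOf, hg]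
    | some line =>
      by_cases hl : line == "Interchange" <;> simp [pvSegOf, hg, hl]
  rw [hbody, PySem.List.foldl_append_eq_flatMap]
  simp [pvBSegs, pvEdges]

-- A's port is the pvStepA fold over the edge list plus the final flush
theorem pvA_eq (graph : List (String × List (String × List (String × String))))
    (path : List String) :
    build_line_segments_py graph path
      = pvFinalA ((pvEdges graph path).foldl pvStepA ([], none, none))
          (PySem.List.pyGetD path (-1) "") := by
  unfold build_line_segments_py
  have h1 := pvFoldPairs
    (fun (st : List (String × String × String) × Option String × Option String) u v =>
      pvStepA st (pvLineGet graph u v, u, v)) path ([], none, none)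
  have h2 : (path.zip path.tail).foldl
      (fun (st : List (String × String × String) × Option String × Option String) p =>
        pvStepA st (pvLineGet graph p.1 p.2, p.1, p.2)) ([], none, none)
      = (pvEdges graph path).foldl pvStepA ([], none, none) := by
    rw [pvEdges, List.foldl_map]
  rw [show (fun (st : List (String × String × String) × Option String × Option String)
        (idx : Int) =>
        let u := PySem.List.pyGetD path idx ""
        let v := PySem.List.pyGetD path (idx + 1) ""
        let edge_line : Option String :=
          (PySem.Dict.mk (((PySem.Dict.mk graph).get? u).getD [])).get? v
            |>.getD [] |> PySem.Dict.mk |>.get? "line"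
        if edge_line == some "Interchange" then
          match st.2.1 with
          | some cl => (st.1 ++ [(cl, st.2.2.getD "", u)], none, none)
          | none => st
        else
          match st.2.1 with
          | none => (st.1, edge_line, some u)
          | some cl =>
            if edge_line != some cl then (st.1 ++ [(cl, st.2.2.getD "", u)], edge_line, some u)
            else st)
      = fun st idx => pvStepA st
          (pvLineGet graph (PySem.List.pyGetD path idx "") (PySem.List.pyGetD path (idx + 1) ""),
           PySem.List.pyGetD path idx "", PySem.List.pyGetD path (idx + 1) "") from rfl]
  rw [h1, h2]
  rfl

-- a run of None/Interchange edges leaves the machine without an open segment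
theorem pvFoldSkip :
    ∀ (l : List (Option String × String × String)) (acc : List (String × String × String))
      (start : Option String),
      (∀ x ∈ l, x.1 = none ∨ x.1 = some "Interchange") →
      ∃ start', l.foldl pvStepA (acc, none, start) = (acc, none, start') := by
  intro l
  induction l with
  | nil => intro acc start _; exact ⟨start, rfl⟩
  | cons e tl ih =>
    intro acc start hall
    rcases hall e (by simp) with he | he
    · have hstep : pvStepA (acc, none, start) e = (acc, none, some e.2.1) := by
        simp [pvStepA, he]
      rw [List.foldl_cons, hstep]
      exact ih acc (some e.2.1) (fun x hx => hall x (by simp [hx]))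
    · have hstep : pvStepA (acc, none, start) e = (acc, none, start) := by
        simp [pvStepA, he]
      rw [List.foldl_cons, hstep]
      exact ih acc start (fun x hx => hall x (by simp [hx]))

-- a run of same-line edges leaves an open segment untouched
theorem pvFoldSame :
    ∀ (l : List (Option String × String × String)) (acc : List (String × String × String))
      (cl : String) (start : Option String),
      cl ≠ "Interchange" → (∀ x ∈ l, x.1 = some cl) →
      l.foldl pvStepA (acc, some cl, start) = (acc, some cl, start) := by
  intro l
  induction l with
  | nil => intro acc cl start _ _; rfl
  | cons e tl ih =>
    intro acc cl start hcl hall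
    have he : e.1 = some cl := hall e (by simp)
    have hstep : pvStepA (acc, some cl, start) e = (acc, some cl, start) := by
      simp [pvStepA, he, hcl]
    rw [List.foldl_cons, hstep]
    exact ih acc cl start hcl (fun x hx => hall x (by simp [hx]))

-- stepping an open segment on an edge of a different line = flush then step from scratch
theorem pvStepS (e : Option String × String × String)
    (acc : List (String × String × String)) (cl : String) (s : Option String)
    (h : e.1 ≠ some cl) :
    pvStepA (acc, some cl, s) e = pvStepA (acc ++ [(cl, s.getD "", e.2.1)], none, none) e := by
  cases he : e.1 with
  | none => simp [pvStepA, he]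
  | some line =>
    by_cases hl : line = "Interchange"
    · simp [pvStepA, he, hl]
    · simp [pvStepA, he, hl]
      intro hcontra
      exact absurd (by rw [he, hcontra]) h

-- main invariant: from a closed state, folding A's machine and flushing = grouped segments
theorem pvMainN :
    ∀ (n : Nat) (es : List (Option String × String × String)), es.length ≤ n →
      ∀ (acc : List (String × String × String)) (start : Option String) (last : String),
        List.IsChain (fun a b => a.2.2 = b.2.1) es →
        (∀ x ∈ es.getLast?, last = x.2.2) →
        pvFinalA (es.foldl pvStepA (acc, none, start)) last = acc ++ pvBSegs es := by
  intro n
  induction n with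
  | zero =>
    intro es hlen acc start last _ _
    have : es = [] := List.length_eq_zero_iff.mp (Nat.le_zero.mp hlen)
    subst this
    simp [pvFinalA, pvBSegs, pvGroupRuns]
  | succ n ih =>
    intro es hlen acc start last hch hl
    cases es with
    | nil => simp [pvFinalA, pvBSegs, pvGroupRuns]
    | cons e tl =>
      have hsplit : e :: tl
          = (e :: tl.takeWhile (fun x => x.1 == e.1)) ++ tl.dropWhile (fun x => x.1 == e.1) := by
        simp
      set run := tl.takeWhile (fun x => x.1 == e.1) with hrun
      set rest := tl.dropWhile (fun x => x.1 == e.1) with hrest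
      have hrun_keys : ∀ x ∈ run, x.1 = e.1 := by
        intro x hx
        rw [hrun] at hx
        have h := List.mem_takeWhile_imp hx
        exact eq_of_beq h
      have hrest_len : rest.length ≤ n := by
        have h1 : rest.length ≤ tl.length := List.length_dropWhile_le _ _
        have h2 : tl.length ≤ n := by simpa using hlen
        omega
      have hrest_suffix : rest <:+ (e :: tl) :=
        (List.dropWhile_suffix _).trans (List.suffix_cons e tl)
      have hrest_chain : List.IsChain (fun a b => a.2.2 = b.2.1) rest :=
        hch.suffix hrest_suffix
      have hrest_last : ∀ x ∈ rest.getLast?, last = x.2.2 := by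
        intro x hx
        have hx' : rest.getLast? = some x := hx
        apply hl
        rw [hsplit, List.getLast?_append, hx']
        rfl
      have hgroups : pvGroupRuns (e :: tl) = (e.1, e :: run) :: pvGroupRuns rest := by
        rw [pvGroupRuns]
      -- fold over the first run
      rw [List.foldl_cons]
      have hfold_split : tl.foldl pvStepA (pvStepA (acc, none, start) e)
          = rest.foldl pvStepA (run.foldl pvStepA (pvStepA (acc, none, start) e)) := by
        conv_lhs => rw [← List.takeWhile_append_dropWhile (p := fun x => x.1 == e.1) (l := tl)]
        rw [List.foldl_append]
      rw [hfold_split]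
      cases he : e.1 with
      | none =>
        have hstep : pvStepA (acc, none, start) e = (acc, none, some e.2.1) := by
          simp [pvStepA, he]
        rw [hstep]
        obtain ⟨start', hsk⟩ := pvFoldSkip run acc (some e.2.1)
          (fun x hx => Or.inl ((hrun_keys x hx).trans he))
        rw [hsk, ih rest hrest_len acc start' last hrest_chain hrest_last]
        simp only [pvBSegs, hgroups, List.flatMap_cons]
        simp [pvSegOf, he]
      | some line =>
        by_cases hline : line = "Interchange"
        · subst hline
          have hstep : pvStepA (acc, none, start) e = (acc, none, start) := by
            simp [pvStepA, he]
          rw [hstep]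
          obtain ⟨start', hsk⟩ := pvFoldSkip run acc start
            (fun x hx => Or.inr ((hrun_keys x hx).trans he))
          rw [hsk, ih rest hrest_len acc start' last hrest_chain hrest_last]
          simp only [pvBSegs, hgroups, List.flatMap_cons]
          simp [pvSegOf, he]
        · have hstep : pvStepA (acc, none, start) e = (acc, some line, some e.2.1) := by
            simp [pvStepA, he, hline]
          rw [hstep]
          rw [pvFoldSame run acc line (some e.2.1) hline
            (fun x hx => (hrun_keys x hx).trans he)]
          have hseg : pvSegOf (e.1, e :: run)
              = [(line, e.2.1, ((e :: run).getLast (by simp)).2.2)] := by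
            simp only [pvSegOf, he]
            rw [if_neg (by simpa using hline)]
            rw [PySem.List.pyGetD_zero_cons, PySem.List.pyGetD_neg_one _ _ (by simp)]
          cases hre : rest with
          | nil =>
            have htl : tl = run := by
              conv_lhs => rw [← List.takeWhile_append_dropWhile (p := fun x => x.1 == e.1) (l := tl)]
              rw [← hrest, hre, List.append_nil]
            have hlast : last = ((e :: run).getLast (by simp)).2.2 := by
              exact hl _ (by rw [htl]; exact List.getLast?_eq_some_getLast (by simp))
            simp only [List.foldl_nil, pvFinalA]
            simp only [pvBSegs, hgroups, hre, List.flatMap_cons, hseg]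
            simp [pvGroupRuns, hlast]
          | cons r rest' =>
            have hr_key : r.1 ≠ some line := by
              have := List.head?_dropWhile_not (fun x => x.1 == e.1) tl
              rw [← hrest, hre] at this
              simp at this
              intro hcontra
              rw [he] at this
              exact this (by rw [hcontra])
            rw [List.foldl_cons, pvStepS r acc line (some e.2.1) hr_key]
            rw [← List.foldl_cons]
            simp only [Option.getD_some]
            have hchain_link : ((e :: run).getLast (by simp)).2.2 = r.2.1 := by
              have h1 := (List.isChain_append.mp (hsplit ▸ hch)).2.2
              have h2 := h1 ((e :: run).getLast (by simp))
                (List.getLast?_eq_some_getLast (by simp))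
              apply h2
              rw [hre]
              simp
            have := ih rest hrest_len (acc ++ [(line, e.2.1, r.2.1)]) none last
              hrest_chain hrest_last
            rw [hre] at this
            rw [this]
            simp only [pvBSegs, hgroups, List.flatMap_cons, hseg, hchain_link]
            rw [hre]
            simp

theorem pvZipLast :
    ∀ (l : List String) (p : String × String),
      (l.zip l.tail).getLast? = some p → l.getLast? = some p.2 := by
  intro l
  induction l with
  | nil => intro p hp; simp at hp
  | cons x l2 ih =>
    intro p hp
    cases l2 with
    | nil => simp at hp
    | cons y t =>
      simp only [List.tail_cons, List.zip_cons_cons] at hp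
      cases hz : (y :: t).zip t with
      | nil =>
        rw [hz] at hp
        simp at hp
        cases t with
        | nil => subst hp; simp
        | cons a b => simp [List.zip] at hz
      | cons q qs =>
        rw [hz, List.getLast?_cons_cons] at hp
        have := ih p (by rw [List.tail_cons, hz]; exact hp)
        rw [List.getLast?_cons_cons]
        cases t with
        | nil => simp [List.zip] at hz
        | cons a b => exact this

theorem pvChainZip (l : List String) :
    List.IsChain (fun (a b : String × String) => a.2 = b.1) (l.zip l.tail) := by
  induction l with
  | nil => simp
  | cons x l2 ih =>
    cases l2 with
    | nil => simp
    | cons y t =>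
      simp only [List.tail_cons, List.zip_cons_cons]
      cases t with
      | nil => simp
      | cons a b =>
        simp only [List.zip_cons_cons] at ih ⊢
        exact ih.cons (by simp)

theorem pvChainEdges (graph : List (String × List (String × List (String × String))))
    (path : List String) :
    List.IsChain (fun (a b : Option String × String × String) => a.2.2 = b.2.1)
      (pvEdges graph path) := by
  rw [pvEdges, List.isChain_map]
  exact pvChainZip path

theorem pvLastEdges (graph : List (String × List (String × List (String × String))))
    (path : List String) :
    ∀ x ∈ (pvEdges graph path).getLast?, PySem.List.pyGetD path (-1) "" = x.2.2 := by
  intro x hx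
  rw [pvEdges, List.getLast?_map] at hx
  simp only [Option.mem_def, Option.map_eq_some_iff] at hx
  obtain ⟨p, hp, hxp⟩ := hx
  have hlast := pvZipLast path p hp
  have hne : path ≠ [] := by
    intro hnil; rw [hnil] at hlast; simp at hlast
  rw [PySem.List.pyGetD_neg_one path "" hne]
  have : path.getLast hne = p.2 := by
    have := List.getLast?_eq_some_getLast (l := path) hne
    rw [this] at hlast
    exact Option.some_injective _ hlast
  rw [this, ← hxp]

-- ===== VERDICT (by name: the statement is the Claim_ definition above) =====
theorem build_line_segments_py_spec : Claim_equal_build_line_segments_py := by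
  intro graph path _ _
  unfold Spec_build_line_segments_py
  rw [pvA_eq, pvAlt_eq]
  exact pvMainN (pvEdges graph path).length (pvEdges graph path) le_rfl [] none _
    (pvChainEdges graph path) (pvLastEdges graph path)
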